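-- pv_equiv track=rewrite | github.com/8hantanu/blog | .github/scripts/update_blog_readme.py | replace_blog_section
-- ===== SOURCE A (Python) =====
-- def replace_blog_section(readme_text: str, new_section: str) -> str:
--     """
--     Replace the README section that starts with a line exactly '# Blog'
--     and continues until the next H1 ('# ') or end-of-file.
--     If '# Blog' doesn't exist, append the section at the end (with spacing).
--     """
--     lines = readme_text.splitlines()
--
--     # find '# Blog' line
--     start = None
--     for idx, line in enumerate(lines):
--         if line.strip() == "# Blog":
--             start = idx
--             break
--
--     if start is None:
--         # append
--         out = readme_text.rstrip() + "\n\n" + new_section.strip() + "\n"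
--         return out
--
--     # find end: next H1 after start
--     end = len(lines)
--     for idx in range(start + 1, len(lines)):
--         if lines[idx].startswith("# "):  # next H1
--             end = idx
--             break
--
--     before = "\n".join(lines[:start]).rstrip()
--     after = "\n".join(lines[end:]).lstrip()
--
--     combined = ""
--     if before:
--         combined += before + "\n\n"
--     combined += new_section.strip() + "\n"
--     if after:
--         combined += "\n" + after.rstrip() + "\n"
--     return combined
-- ===== SOURCE B (Python) =====
-- def replace_blog_section(readme_text: str, new_section: str) -> str:
--     # Single pass over the lines with a 3-state machine (before / inside-blog / after)
--     # instead of two index scans plus slicing.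
--     before = []
--     after = []
--     state = 0  # 0 = before '# Blog', 1 = inside the Blog section, 2 = after it
--     for line in readme_text.splitlines():
--         if state == 0:
--             if line.strip() == "# Blog":
--                 state = 1
--             else:
--                 before.append(line)
--         elif state == 1:
--             if line.startswith("# "):
--                 state = 2
--                 after.append(line)
--         else:
--             after.append(line)
--
--     if state == 0:
--         return readme_text.rstrip() + "\n\n" + new_section.strip() + "\n"
--
--     before_s = "\n".join(before).rstrip()
--     after_s = "\n".join(after).lstrip()
--
--     combined = ""
--     if before_s:
--         combined += before_s + "\n\n"
--     combined += new_section.strip() + "\n"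
--     if after_s:
--         combined += "\n" + after_s.rstrip() + "\n"
--     return combined
-- ===== Notes on version B (the rewrite author's own statement) =====
-- stated objective: simpler
-- what changed: B replaces A's two separate index scans (find the '# Blog' line, then a range() scan with indexing for the next H1) plus list slicing by one pass over the lines with a 3-state machine (before/inside/after) and two accumulator lists.
import Mathlib
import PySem

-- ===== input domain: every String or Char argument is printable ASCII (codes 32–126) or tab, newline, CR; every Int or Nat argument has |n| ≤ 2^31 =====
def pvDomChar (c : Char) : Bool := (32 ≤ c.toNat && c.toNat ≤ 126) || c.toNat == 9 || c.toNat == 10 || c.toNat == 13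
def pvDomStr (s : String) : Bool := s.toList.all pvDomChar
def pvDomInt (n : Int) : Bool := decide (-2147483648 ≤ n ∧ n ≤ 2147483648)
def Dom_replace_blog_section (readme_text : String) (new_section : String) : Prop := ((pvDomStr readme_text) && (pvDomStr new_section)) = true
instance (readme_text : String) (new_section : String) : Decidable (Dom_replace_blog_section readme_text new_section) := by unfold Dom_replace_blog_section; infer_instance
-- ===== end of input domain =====

-- B replaces A's two index scans (find '# Blog', then find the next H1 by range+indexing) and
-- slicing by ONE pass over the lines with a 3-state machine and two accumulators (objective: simpler).

-- ===== PORT A =====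
-- 'for idx, line in enumerate(lines): if line.strip() == "# Blog": start = idx; break'
def pvFindStartA : List (List Char) → Nat → Option Nat
  | [], _ => none
  | l :: rest, idx =>
    if PySem.Chars.strip l = "# Blog".toList then some idx
    else pvFindStartA rest (idx + 1)

-- 'for idx in range(start+1, len(lines)): if lines[idx].startswith("# "): end = idx; break'
-- (indexing is exact: every idx the range produces is in bounds, so getD's default is never used)
def pvFindEndA (lines : List (List Char)) : List Int → Int → Int
  | [], dflt => dflt
  | i :: rest, dflt =>
    if PySem.Chars.startswith ((PySem.List.pyGet? lines i).getD []) "# ".toList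
    then i else pvFindEndA lines rest dflt

def pvReplaceA (r ns : List Char) : List Char :=
  let lines := PySem.Chars.splitlines r
  match pvFindStartA lines 0 with
  | none =>
      PySem.Chars.rstrip r ++ "\n\n".toList ++ PySem.Chars.strip ns ++ "\n".toList
  | some start =>
      let e := pvFindEndA lines (PySem.List.pyRange ((start : Int) + 1) (lines.length : Int) 1) (lines.length : Int)
      let before := PySem.Chars.rstrip (PySem.Chars.join "\n".toList (PySem.List.slice lines none (some (start : Int))))
      let after := PySem.Chars.lstrip (PySem.Chars.join "\n".toList (PySem.List.slice lines (some e) none))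
      (if before ≠ [] then before ++ "\n\n".toList else []) ++
      PySem.Chars.strip ns ++ "\n".toList ++
      (if after ≠ [] then "\n".toList ++ PySem.Chars.rstrip after ++ "\n".toList else [])

def replace_blog_section (readme_text : String) (new_section : String) : String :=
  String.ofList (pvReplaceA readme_text.toList new_section.toList)

-- ===== PORT B =====
-- the single pass: state 0 = before '# Blog', 1 = inside the Blog section, 2 = after it
def pvLoopB : Nat → List (List Char) → List (List Char) → List (List Char) → Nat × List (List Char) × List (List Char)
  | state, before, after, [] => (state, before, after)
  | state, before, after, line :: rest =>
    if state = 0 then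
      if PySem.Chars.strip line = "# Blog".toList then pvLoopB 1 before after rest
      else pvLoopB 0 (before ++ [line]) after rest
    else if state = 1 then
      if PySem.Chars.startswith line "# ".toList then pvLoopB 2 before (after ++ [line]) rest
      else pvLoopB 1 before after rest
    else pvLoopB 2 before (after ++ [line]) rest

def pvReplaceB (r ns : List Char) : List Char :=
  let res := pvLoopB 0 [] [] (PySem.Chars.splitlines r)
  if res.1 = 0 then
    PySem.Chars.rstrip r ++ "\n\n".toList ++ PySem.Chars.strip ns ++ "\n".toList
  else
    let before_s := PySem.Chars.rstrip (PySem.Chars.join "\n".toList res.2.1)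
    let after_s := PySem.Chars.lstrip (PySem.Chars.join "\n".toList res.2.2)
    (if before_s ≠ [] then before_s ++ "\n\n".toList else []) ++
    PySem.Chars.strip ns ++ "\n".toList ++
    (if after_s ≠ [] then "\n".toList ++ PySem.Chars.rstrip after_s ++ "\n".toList else [])

def replace_blog_section_alt (readme_text : String) (new_section : String) : String :=
  String.ofList (pvReplaceB readme_text.toList new_section.toList)

-- ===== PRECONDITION & SPEC =====
def Spec_replace_blog_section (readme_text : String) (new_section : String) (out : String) : Prop := out = replace_blog_section_alt readme_text new_section
instance (readme_text : String) (new_section : String) (out : String) : Decidable (Spec_replace_blog_section readme_text new_section out) := by unfold Spec_replace_blog_section; infer_instance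

-- ===== CLAIM (what is proved, stated in full; the proofs are below) =====
def Claim_equal_replace_blog_section : Prop := ∀ (readme_text : String) (new_section : String), Dom_replace_blog_section readme_text new_section → Spec_replace_blog_section readme_text new_section (replace_blog_section readme_text new_section)

-- ===== LEMMAS AND PROOFS =====

-- decomposition of a line list by the first line satisfying p
theorem pv_decomp (p : List Char → Bool) :
    ∀ ls : List (List Char), (∀ l ∈ ls, p l = false) ∨
      ∃ pre m post, ls = pre ++ m :: post ∧ (∀ l ∈ pre, p l = false) ∧ p m = true := by
  intro ls
  induction ls with
  | nil => exact Or.inl (by simp)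
  | cons a t ih =>
    by_cases hpa : p a = true
    · exact Or.inr ⟨[], a, t, by simp, by simp, hpa⟩
    · rcases ih with h | ⟨pre, m, post, rfl, hpre, hm⟩
      · exact Or.inl (by
          intro l hl
          rcases List.mem_cons.mp hl with rfl | hl
          · simpa using hpa
          · exact h l hl)
      · exact Or.inr ⟨a :: pre, m, post, by simp, by
          intro l hl
          rcases List.mem_cons.mp hl with rfl | hl
          · simpa using hpa
          · exact hpre l hl, hm⟩

theorem pvFindStartA_none (ls : List (List Char)) (k : Nat)
    (h : ∀ l ∈ ls, ¬ PySem.Chars.strip l = "# Blog".toList) :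
    pvFindStartA ls k = none := by
  induction ls generalizing k with
  | nil => rfl
  | cons a t ih =>
    simp only [pvFindStartA]
    rw [if_neg (h a (by simp))]
    exact ih _ (fun l hl => h l (by simp [hl]))

theorem pvFindStartA_some (pre : List (List Char)) (m : List Char) (post : List (List Char)) (k : Nat)
    (hpre : ∀ l ∈ pre, ¬ PySem.Chars.strip l = "# Blog".toList)
    (hm : PySem.Chars.strip m = "# Blog".toList) :
    pvFindStartA (pre ++ m :: post) k = some (k + pre.length) := by
  induction pre generalizing k with
  | nil => simp [pvFindStartA, hm]
  | cons a t ih =>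
    simp only [List.cons_append, pvFindStartA]
    rw [if_neg (hpre a (by simp))]
    rw [ih _ (fun l hl => hpre l (by simp [hl]))]
    simp; omega

theorem pvLoopB_state0_none (ls : List (List Char)) (b a : List (List Char))
    (h : ∀ l ∈ ls, ¬ PySem.Chars.strip l = "# Blog".toList) :
    pvLoopB 0 b a ls = (0, b ++ ls, a) := by
  induction ls generalizing b with
  | nil => simp [pvLoopB]
  | cons x t ih =>
    simp only [pvLoopB]
    rw [if_neg (h x (by simp))]
    rw [ih _ (fun l hl => h l (by simp [hl]))]
    simp

theorem pvLoopB_state0_found (pre : List (List Char)) (m : List Char) (post : List (List Char))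
    (b a : List (List Char))
    (hpre : ∀ l ∈ pre, ¬ PySem.Chars.strip l = "# Blog".toList)
    (hm : PySem.Chars.strip m = "# Blog".toList) :
    pvLoopB 0 b a (pre ++ m :: post) = pvLoopB 1 (b ++ pre) a post := by
  induction pre generalizing b with
  | nil => simp [pvLoopB, hm]
  | cons x t ih =>
    simp only [List.cons_append, pvLoopB]
    rw [if_neg (hpre x (by simp))]
    rw [ih _ (fun l hl => hpre l (by simp [hl]))]
    simp

theorem pvLoopB_state2 (ls : List (List Char)) (b a : List (List Char)) :
    pvLoopB 2 b a ls = (2, b, a ++ ls) := by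
  induction ls generalizing a with
  | nil => simp [pvLoopB]
  | cons x t ih => simp [pvLoopB, ih]

theorem pvLoopB_state1_none (ls : List (List Char)) (b a : List (List Char))
    (h : ∀ l ∈ ls, ¬ PySem.Chars.startswith l "# ".toList = true) :
    pvLoopB 1 b a ls = (1, b, a) := by
  induction ls with
  | nil => rfl
  | cons x t ih =>
    simp only [pvLoopB]
    rw [if_pos trivial, if_neg (h x (by simp))]
    exact ih (fun l hl => h l (by simp [hl]))

theorem pvLoopB_state1_found (q : List (List Char)) (h : List Char) (t : List (List Char))
    (b a : List (List Char))
    (hq : ∀ l ∈ q, ¬ PySem.Chars.startswith l "# ".toList = true)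
    (hh : PySem.Chars.startswith h "# ".toList = true) :
    pvLoopB 1 b a (q ++ h :: t) = (2, b, a ++ h :: t) := by
  induction q with
  | nil =>
    simp only [List.nil_append, pvLoopB]
    rw [if_pos trivial, if_pos hh, pvLoopB_state2]
    simp
  | cons x q' ih =>
    simp only [List.cons_append, pvLoopB]
    rw [if_pos trivial, if_neg (hq x (by simp))]
    exact ih (fun l hl => hq l (by simp [hl]))

theorem pvFindEndA_none (lines : List (List Char)) (k : Nat) (hk : k ≤ lines.length)
    (h : ∀ l ∈ lines.drop k, ¬ PySem.Chars.startswith l "# ".toList = true) :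
    pvFindEndA lines (PySem.List.pyRange (k : Int) (lines.length : Int) 1) (lines.length : Int)
      = (lines.length : Int) := by
  by_cases hlt : k < lines.length
  · rw [PySem.List.pyRange_one_cons (by exact_mod_cast hlt)]
    simp only [pvFindEndA]
    have hget : (PySem.List.pyGet? lines (k : Int)).getD [] = lines[k] := by
      simp [hlt]
    have hmem : lines[k] ∈ lines.drop k := by
      have h0 : 0 < (lines.drop k).length := by
        rw [List.length_drop]; omega
      have := List.getElem_mem h0
      simpa using this
    rw [hget, if_neg (h lines[k] hmem)]
    have : ((k : Int) + 1) = ((k + 1 : Nat) : Int) := by push_cast; ring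
    rw [this]
    exact pvFindEndA_none lines (k + 1) (by omega)
      (fun l hl => h l (by
        have hdd : lines.drop (k + 1) = (lines.drop k).drop 1 := by
          rw [List.drop_drop, Nat.add_comm]
        rw [hdd] at hl
        exact List.mem_of_mem_drop hl))
  · rw [PySem.List.pyRange_one_eq_nil (by exact_mod_cast (by omega : lines.length ≤ k))]
    rfl
termination_by lines.length - k

theorem pvFindEndA_found (lines : List (List Char)) (k : Nat)
    (q : List (List Char)) (h : List Char) (t : List (List Char))
    (hdrop : lines.drop k = q ++ h :: t)
    (hq : ∀ l ∈ q, ¬ PySem.Chars.startswith l "# ".toList = true)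
    (hh : PySem.Chars.startswith h "# ".toList = true) :
    pvFindEndA lines (PySem.List.pyRange (k : Int) (lines.length : Int) 1) (lines.length : Int)
      = ((k + q.length : Nat) : Int) := by
  induction q generalizing k with
  | nil =>
    have hlt : k < lines.length := by
      by_contra hge
      rw [List.drop_eq_nil_of_le (by omega)] at hdrop
      simp at hdrop
    rw [PySem.List.pyRange_one_cons (by exact_mod_cast hlt)]
    simp only [pvFindEndA]
    have hget : (PySem.List.pyGet? lines (k : Int)).getD [] = lines[k] := by
      simp [hlt]
    have hk9 : lines[k]? = some h := by
      have := congrArg (fun xs => xs.head?) hdrop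
      simpa [List.head?_drop] using this
    have hk : lines[k] = h := by
      rw [List.getElem?_eq_getElem hlt] at hk9
      exact Option.some.inj hk9
    rw [hget, hk, if_pos hh]
    simp
  | cons x q' ih =>
    have hlt : k < lines.length := by
      by_contra hge
      rw [List.drop_eq_nil_of_le (by omega)] at hdrop
      simp at hdrop
    rw [PySem.List.pyRange_one_cons (by exact_mod_cast hlt)]
    simp only [pvFindEndA]
    have hget : (PySem.List.pyGet? lines (k : Int)).getD [] = lines[k] := by
      simp [hlt]
    have hkx9 : lines[k]? = some x := by
      have := congrArg (fun xs => xs.head?) hdrop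
      simpa [List.head?_drop] using this
    have hkx : lines[k] = x := by
      rw [List.getElem?_eq_getElem hlt] at hkx9
      exact Option.some.inj hkx9
    rw [hget, hkx, if_neg (hq x (by simp))]
    have hcast : ((k : Int) + 1) = ((k + 1 : Nat) : Int) := by push_cast; ring
    rw [hcast]
    have hdrop' : lines.drop (k + 1) = q' ++ h :: t := by
      have hdd : lines.drop (k + 1) = (lines.drop k).drop 1 := by
        rw [List.drop_drop, Nat.add_comm]
      rw [hdd, hdrop]; simp
    rw [ih (k + 1) hdrop' (fun l hl => hq l (by simp [hl]))]
    congr 1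
    simp; omega

theorem pvReplace_eq (r ns : List Char) : pvReplaceA r ns = pvReplaceB r ns := by
  simp only [pvReplaceA, pvReplaceB]
  rcases pv_decomp (fun l => decide (PySem.Chars.strip l = "# Blog".toList)) (PySem.Chars.splitlines r)
    with hnone | ⟨pre, m, post, heq, hpre, hm⟩
  · have hnone' : ∀ l ∈ PySem.Chars.splitlines r, ¬ PySem.Chars.strip l = "# Blog".toList := by
      intro l hl; simpa using hnone l hl
    rw [pvFindStartA_none _ 0 hnone', pvLoopB_state0_none _ _ _ hnone']
    rfl
  · have hpre' : ∀ l ∈ pre, ¬ PySem.Chars.strip l = "# Blog".toList := by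
      intro l hl; simpa using hpre l hl
    have hm' : PySem.Chars.strip m = "# Blog".toList := by simpa using hm
    rw [heq, pvFindStartA_some pre m post 0 hpre' hm', pvLoopB_state0_found pre m post [] [] hpre' hm']
    simp only [Nat.zero_add, List.nil_append]
    have hslice_before : PySem.List.slice (pre ++ m :: post) none (some ((pre.length : Nat) : Int)) = pre := by
      rw [PySem.List.slice_to_natCast]
      exact List.take_left ..
    have hcast1 : ((pre.length : Nat) : Int) + 1 = ((pre.length + 1 : Nat) : Int) := by push_cast; ring
    rcases pv_decomp (fun l => PySem.Chars.startswith l "# ".toList) post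
      with hno | ⟨q, h, t, heqp, hq, hh⟩
    · -- no later H1: end = len(lines), after = []
      have hdrop : (pre ++ m :: post).drop (pre.length + 1) = post := by
        have : pre ++ m :: post = (pre ++ [m]) ++ post := by simp
        rw [this]
        have hl : (pre ++ [m]).length = pre.length + 1 := by simp
        rw [← hl, List.drop_left]
      have hno' : ∀ l ∈ (pre ++ m :: post).drop (pre.length + 1),
          ¬ PySem.Chars.startswith l "# ".toList = true := by
        rw [hdrop]; intro l hl; simpa using hno l hl
      rw [hcast1, pvFindEndA_none _ (pre.length + 1) (by simp) hno',
          pvLoopB_state1_none _ _ _ (fun l hl => by simpa using hno l hl)]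
      have hslice_after : PySem.List.slice (pre ++ m :: post)
          (some (((pre ++ m :: post).length : Nat) : Int)) none = ([] : List (List Char)) := by
        rw [PySem.List.slice_from_natCast]
        simp
      rw [hslice_before, hslice_after]
      rfl
    · -- later H1 at h: end = pre.length + 1 + q.length, after = h :: t
      subst heqp
      have hdrop : (pre ++ m :: (q ++ h :: t)).drop (pre.length + 1) = q ++ h :: t := by
        have : pre ++ m :: (q ++ h :: t) = (pre ++ [m]) ++ (q ++ h :: t) := by simp
        rw [this]
        have hl : (pre ++ [m]).length = pre.length + 1 := by simp
        rw [← hl, List.drop_left]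
      rw [hcast1, pvFindEndA_found _ (pre.length + 1) q h t hdrop
            (fun l hl => by simpa using hq l hl) hh,
          pvLoopB_state1_found q h t _ _ (fun l hl => by simpa using hq l hl) hh]
      have hslice_after : PySem.List.slice (pre ++ m :: (q ++ h :: t))
          (some ((pre.length + 1 + q.length : Nat) : Int)) none = h :: t := by
        rw [PySem.List.slice_from_natCast]
        have : pre ++ m :: (q ++ h :: t) = (pre ++ m :: q) ++ (h :: t) := by simp
        rw [this]
        have hl : (pre ++ m :: q).length = pre.length + 1 + q.length := by simp; omega
        rw [← hl, List.drop_left]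
      rw [hslice_before, hslice_after]
      rfl

-- ===== VERDICT (by name: the statement is the Claim_ definition above) =====
theorem replace_blog_section_spec : Claim_equal_replace_blog_section := by
  intro r ns _
  unfold Spec_replace_blog_section replace_blog_section replace_blog_section_alt
  rw [pvReplace_eq]
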